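-- pv_equiv track=rewrite | github.com/kilala-mega/practice_everyday | longest-substring-of-all-vowels-in-order.py | longestBeautifulSubstring
-- ===== SOURCE A (Python) =====
-- def longestBeautifulSubstring(word: str) -> int:
--     if len(word) < 5:
--         return 0
--     seen = set()
--     lo, hi = 0, 0
--     res = 0
--     for hi,w in enumerate(word):
--         if hi > 0 and word[hi] < word[hi-1]:
--             # not in order
--             seen = set()
--             lo = hi
--         seen.add(w)
--         if len(seen) == 5:
--             res = max(res, hi-lo+1)
--     return res
-- ===== SOURCE B (Python) =====
-- def longestBeautifulSubstring(word: str) -> int: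
--     # Two-stage closed form: run-length encode the word into (char, count)
--     # blocks; every run start whose next four block boundaries all ascend
--     # contributes one candidate -- the total size of those five blocks
--     # (exactly five distinct characters, non-decreasing).
--     blocks = []
--     i, n = 0, len(word)
--     while i < n:
--         j = i + 1
--         while j < n and word[j] == word[i]:
--             j += 1
--         blocks.append((word[i], j - i))
--         i = j
--     best = 0
--     for s in range(len(blocks) - 4):
--         if s > 0 and blocks[s - 1][0] < blocks[s][0]:
--             continue  # block s does not start a maximal non-decreasing run
--         a, b, c, d, e = (blocks[s][0], blocks[s + 1][0], blocks[s + 2][0],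
--                          blocks[s + 3][0], blocks[s + 4][0])
--         if a < b and b < c and c < d and d < e:
--             best = max(best, sum(k for _, k in blocks[s:s + 5]))
--     return best
-- ===== Notes on version B (the rewrite author's own statement) =====
-- stated objective: alternative
-- what changed: B first run-length encodes the word into (char,count) blocks and then, instead of A's stateful scan with a reset set and window indices, checks each block index directly with a closed-form condition (run start + four ascending block boundaries) and takes the sum of five block counts as the candidate length.
import Mathlib
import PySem

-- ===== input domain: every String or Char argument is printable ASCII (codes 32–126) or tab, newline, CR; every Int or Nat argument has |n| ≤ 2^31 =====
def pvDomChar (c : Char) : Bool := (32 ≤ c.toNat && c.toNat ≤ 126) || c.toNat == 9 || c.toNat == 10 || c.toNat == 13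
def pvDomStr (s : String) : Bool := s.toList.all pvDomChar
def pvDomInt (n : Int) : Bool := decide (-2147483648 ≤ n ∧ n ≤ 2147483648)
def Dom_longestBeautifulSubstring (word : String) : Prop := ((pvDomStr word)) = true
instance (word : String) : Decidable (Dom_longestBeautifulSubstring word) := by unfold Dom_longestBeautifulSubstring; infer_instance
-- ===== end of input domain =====

-- B replaces A's stateful reset-scan by run-length encoding plus a closed-form per-block-index window check; same O(n) cost, different algorithm.

-- ===== PORT A =====
-- loop body of A (one iteration of 'for hi, w in enumerate(word)'); indices word[hi]/word[hi-1]
-- are always in range where evaluated, so pyGetD is exact.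
def stepA (cs : List Char) (st : PySem.Set Char × Int × Int) (p : Int × Char) :
    PySem.Set Char × Int × Int :=
  let hi := p.1; let w := p.2
  let seen := st.1; let lo := st.2.1; let res := st.2.2
  let sl :=
    if decide (hi > 0) && decide (PySem.List.pyGetD cs hi 'a' < PySem.List.pyGetD cs (hi-1) 'a')
    then ((PySem.Set.empty : PySem.Set Char), hi) else (seen, lo)
  let seen := PySem.Set.add sl.1 w
  let res := if PySem.Set.len seen == 5 then max res (hi - sl.2 + 1) else res
  (seen, sl.2, res)

-- literal port of A: single pass over enumerate(word), a set `seen` reset at each descent.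
def longestBeautifulSubstring (word : String) : Int :=
  let cs := word.toList
  if cs.length < 5 then 0 else
  ((PySem.List.enumerate cs).foldl (stepA cs) (PySem.Set.empty, 0, 0)).2.2

-- ===== PORT B =====
-- stage 1 of B: the outer while loop; the inner 'while j < n and word[j] == word[i]'
-- is exactly takeWhile/dropWhile on the remaining characters.
def pvRle : List Char → List (Char × Int)
  | [] => []
  | c :: t =>
    (c, ((t.takeWhile (fun x => x == c)).length : Int) + 1) ::
      pvRle (t.dropWhile (fun x => x == c))
  termination_by cs => cs.length
  decreasing_by
    simp only [List.length_cons]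
    exact Nat.lt_succ_of_le (List.length_dropWhile_le (fun x => x == c) t)

-- stage 2 of B: the body of 'for s in range(len(blocks) - 4)'.
def pvCand (blocks : List (Char × Int)) (best : Int) (s : Int) : Int :=
  if decide (s > 0) &&
     decide ((PySem.List.pyGetD blocks (s-1) ('a',0)).1 < (PySem.List.pyGetD blocks s ('a',0)).1)
  then best
  else
    let a := (PySem.List.pyGetD blocks s ('a',0)).1
    let b := (PySem.List.pyGetD blocks (s+1) ('a',0)).1
    let c := (PySem.List.pyGetD blocks (s+2) ('a',0)).1
    let d := (PySem.List.pyGetD blocks (s+3) ('a',0)).1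
    let e := (PySem.List.pyGetD blocks (s+4) ('a',0)).1
    if decide (a < b) && decide (b < c) && decide (c < d) && decide (d < e)
    then max best ((PySem.List.slice blocks (some s) (some (s+5))).foldl (fun acc p => acc + p.2) 0)
    else best

-- literal port of B: run-length encode, then fold the window check over the block indices.
def longestBeautifulSubstring_alt (word : String) : Int :=
  let blocks := pvRle word.toList
  (PySem.List.pyRange 0 ((blocks.length : Int) - 4) 1).foldl (pvCand blocks) 0

-- ===== PRECONDITION & SPEC =====
def Spec_longestBeautifulSubstring (word : String) (out : Int) : Prop := out = longestBeautifulSubstring_alt word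
instance (word : String) (out : Int) : Decidable (Spec_longestBeautifulSubstring word out) := by unfold Spec_longestBeautifulSubstring; infer_instance

-- ===== CLAIM (what is proved, stated in full; the proofs are below) =====
def Claim_equal_longestBeautifulSubstring : Prop := ∀ (word : String), Dom_longestBeautifulSubstring word → Spec_longestBeautifulSubstring word (longestBeautifulSubstring word)

-- ===== LEMMAS AND PROOFS =====

-- A's loop, rephrased as a recursion over the remaining characters carrying the previous char.
def goA : List Char → Char → Int → PySem.Set Char → Int → Int → Int
  | [], _, _, _, _, res => res
  | w :: t, prev, hi, seen, lo, res =>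
    let sl := if decide (w < prev) then ((PySem.Set.empty : PySem.Set Char), hi) else (seen, lo)
    let seen' := PySem.Set.add sl.1 w
    let res' := if PySem.Set.len seen' == 5 then max res (hi - sl.2 + 1) else res
    goA t w (hi + 1) seen' sl.2 res'

-- the same loop with the set replaced by a distinct-count and the window by its length.
def goC : List Char → Char → Int → Int → Int → Int
  | [], _, _, _, res => res
  | w :: t, prev, runLen, distinct, res =>
    let rd := if decide (w < prev) then ((1 : Int), (1 : Int))
              else (runLen + 1, if decide (prev < w) then distinct + 1 else distinct)
    let res' := if rd.2 == 5 then max res rd.1 else res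
    goC t w rd.1 rd.2 res'

-- goC block by block: one step of goC-state per (char, count) block.
def goBlk : List (Char × Int) → Char → Int → Int → Int → Int
  | [], _, _, _, res => res
  | (c, k) :: bs, prev, r, d, res =>
    let rd := if decide (c < prev) then (k, (1 : Int))
              else (r + k, if decide (prev < c) then d + 1 else d)
    goBlk bs c rd.1 rd.2 (if rd.2 == 5 then max res rd.1 else res)

def goBlk0 : List (Char × Int) → Int
  | [] => 0
  | (c, k) :: bs => goBlk bs c k 1 0

-- sum of the counts of m strictly ascending blocks from char p (none if no such chain).
def chainAsc : Nat → Char → List (Char × Int) → Option Int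
  | 0, _, _ => some 0
  | _ + 1, _, [] => none
  | m + 1, p, (c, k) :: bs => if p < c then (chainAsc m c bs).map (k + ·) else none

def opmax (res : Int) : Option Int → Int
  | none => res
  | some v => max res v

-- the pending candidate of the current run: it needs 5 - d more ascending blocks.
def pend (p : Char) (r d : Int) (bs : List (Char × Int)) : Option Int :=
  if d < 5 then (chainAsc (5 - d).toNat p bs).map (r + ·) else none

-- best over the runs that START inside bs (previous block char p).
def hbest : List (Char × Int) → Char → Int → Int
  | [], _, best => best
  | (c, k) :: bs, p, best =>
    hbest bs c (if decide (p < c) then best else opmax best ((chainAsc 4 c bs).map (k + ·)))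

def hbest0 : List (Char × Int) → Int
  | [] => 0
  | (c, k) :: bs => hbest bs c (opmax 0 ((chainAsc 4 c bs).map (k + ·)))

theorem extA (cs : List Char) :
    ∀ (t : List Char) (k : Nat) (prev : Char) (seen : PySem.Set Char) (lo res : Int),
      1 ≤ k → cs.drop k = t → cs.getD (k - 1) 'a' = prev →
      ((PySem.List.enumerate t (k : Int)).foldl (stepA cs) (seen, lo, res)).2.2
      = goA t prev (k : Int) seen lo res := by
  intro t
  induction t with
  | nil => intro k prev seen lo res hk hdrop hprev; rfl
  | cons w t' ih =>
    intro k prev seen lo res hk hdrop hprev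
    have hkw : cs.getD k 'a' = w := by
      have h0 : cs[k]? = some w := by
        have : (cs.drop k)[0]? = some w := by rw [hdrop]; rfl
        simpa using this
      simp [List.getD_eq_getElem?_getD, h0]
    have hdrop' : cs.drop (k + 1) = t' := by
      have h1 : cs.drop (k + 1) = (cs.drop k).drop 1 := by rw [List.drop_drop]
      rw [h1, hdrop]; rfl
    rw [PySem.List.enumerate_cons, List.foldl_cons]
    have hget1 : PySem.List.pyGetD cs ((k : Int)) 'a' = w := by
      simpa [PySem.List.pyGetD_natCast] using hkw
    have hget2 : PySem.List.pyGetD cs ((k : Int) - 1) 'a' = prev := by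
      have hc : ((k : Int) - 1) = ((k - 1 : Nat) : Int) := by omega
      rw [hc, PySem.List.pyGetD_natCast]; exact hprev
    have hpos : decide ((k : Int) > 0) = true := by simp; omega
    have hstep : stepA cs (seen, lo, res) ((k : Int), w)
        = (PySem.Set.add (if decide (w < prev) then ((PySem.Set.empty : PySem.Set Char), (k:Int)) else (seen, lo)).1 w,
           (if decide (w < prev) then ((PySem.Set.empty : PySem.Set Char), (k:Int)) else (seen, lo)).2,
           if PySem.Set.len (PySem.Set.add (if decide (w < prev) then ((PySem.Set.empty : PySem.Set Char), (k:Int)) else (seen, lo)).1 w) == 5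
           then max res ((k:Int) - (if decide (w < prev) then ((PySem.Set.empty : PySem.Set Char), (k:Int)) else (seen, lo)).2 + 1) else res) := by
      simp only [stepA, hget1, hget2, hpos, Bool.true_and]
    rw [hstep]
    show ((PySem.List.enumerate t' ((k : Int) + 1)).foldl (stepA cs) _).2.2 = _
    rw [show ((k : Int) + 1) = ((k + 1 : Nat) : Int) by push_cast; ring]
    rw [ih (k + 1) w _ _ _ (by omega) hdrop' (by simpa using hkw)]
    simp only [goA]
    rw [show (((k+1) : Nat) : Int) = (k : Int) + 1 by push_cast; ring]

-- core invariant: the set's cardinality is the distinct counter, the window length is the run counter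
theorem goA_eq_goC :
    ∀ (t : List Char) (prev : Char) (seen : PySem.Set Char) (hi lo res runLen distinct : Int),
      prev ∈ seen → (∀ x ∈ seen, x ≤ prev) →
      ((PySem.Set.len seen : Int) = distinct) → hi - lo = runLen →
      goA t prev hi seen lo res = goC t prev runLen distinct res := by
  intro t
  induction t with
  | nil => intro prev seen hi lo res r d _ _ _ _; rfl
  | cons w t' ih =>
    intro prev seen hi lo res r d hmem hle hlen hwin
    by_cases hlt : w < prev
    · simp only [goA, goC, hlt, decide_true, if_true]
      have hadd : PySem.Set.add (PySem.Set.empty : PySem.Set Char) w = [w] := rfl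
      rw [hadd]
      have h1 : (PySem.Set.len ([w] : PySem.Set Char) : Int) = 1 := rfl
      rw [show (PySem.Set.len ([w] : PySem.Set Char) == 5) = ((1 : Int) == 5) from by rw [h1]]
      rw [show hi - hi + 1 = (1 : Int) from by ring]
      exact ih w [w] (hi + 1) hi _ 1 1 (by simp) (by simp) h1 (by ring)
    · have hge : prev ≤ w := le_of_not_gt hlt
      simp only [goA, goC, hlt, decide_false, if_false, Bool.false_eq_true]
      by_cases hgt : prev < w
      · have hnot : w ∉ seen := fun h => absurd (hle w h) (not_le.mpr hgt)
        have hadd := PySem.Set.add_of_not_mem hnot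
        rw [hadd]
        have hlen' : (PySem.Set.len (seen ++ [w]) : Int) = d + 1 := by
          simp only [PySem.Set.len] at *
          simp only [List.length_append, List.length_cons, List.length_nil]
          push_cast
          omega
        simp only [hgt, decide_true, if_true]
        rw [show (PySem.Set.len (seen ++ [w]) == 5) = ((d + 1 : Int) == 5) from by rw [hlen']]
        rw [show hi - lo + 1 = r + 1 from by omega]
        exact ih w (seen ++ [w]) (hi + 1) lo _ (r + 1) (d + 1)
          (by simp)
          (fun x hx => by
            rcases List.mem_append.mp hx with h | h
            · exact le_trans (hle x h) hge
            · simp at h; simp [h])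
          hlen' (by omega)
      · have heq : w = prev := le_antisymm (le_of_not_gt hgt) hge
        have hmem' : w ∈ seen := heq ▸ hmem
        rw [PySem.Set.add_of_mem hmem']
        simp only [hgt, decide_false, if_false, Bool.false_eq_true]
        rw [show (PySem.Set.len seen == 5) = ((d : Int) == 5) from by rw [hlen]]
        rw [show hi - lo + 1 = r + 1 from by omega]
        exact ih w seen (hi + 1) lo _ (r + 1) d (heq ▸ hmem) (fun x hx => heq ▸ hle x hx)
          hlen (by omega)

-- one goC step on a repeated character.
theorem goC_cons_eq (c : Char) (t : List Char) (r d res : Int) :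
    goC (c :: t) c r d res = goC t c (r + 1) d (if d = 5 then max res (r + 1) else res) := by
  simp only [goC, lt_self_iff_false, decide_false, Bool.false_eq_true, if_false]
  congr 1
  by_cases h5 : d = 5
  · rw [if_pos (by simpa using h5), if_pos h5]
  · rw [if_neg (by simpa using h5), if_neg h5]

theorem pvRle_nil : pvRle [] = [] := by simp [pvRle]

theorem pvRle_cons (c : Char) (t : List Char) :
    pvRle (c :: t)
    = (c, ((t.takeWhile (fun x => x == c)).length : Int) + 1) ::
        pvRle (t.dropWhile (fun x => x == c)) := by
  simp [pvRle]

-- goC over an equal-char block of m further copies of the current char.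
theorem goC_replicate (c : Char) :
    ∀ (m : Nat) (t : List Char) (r d res : Int), (d = 5 → r ≤ res) →
      goC (List.replicate m c ++ t) c r d res
      = goC t c (r + m) d (if d = 5 then max res (r + m) else res) := by
  intro m
  induction m with
  | zero =>
    intro t r d res h
    simp only [List.replicate_zero, List.nil_append, Nat.cast_zero, add_zero]
    by_cases h5 : d = 5
    · rw [if_pos h5, max_eq_left (h h5)]
    · rw [if_neg h5]
  | succ m ih =>
    intro t r d res h
    rw [List.replicate_succ, List.cons_append, goC_cons_eq]
    rw [ih t (r + 1) d _ (by intro h5; rw [if_pos h5]; omega)]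
    rw [show (((m + 1 : Nat)) : Int) = (m : Int) + 1 by push_cast; ring]
    rw [show r + 1 + (m : Int) = r + ((m : Int) + 1) by ring]
    congr 1
    by_cases h5 : d = 5
    · rw [if_pos h5, if_pos h5, if_pos h5, max_assoc]
      congr 1
      omega
    · rw [if_neg h5, if_neg h5, if_neg h5]

theorem takeWhile_eq_replicate (c : Char) (t : List Char) :
    t.takeWhile (fun x => x == c) = List.replicate (t.takeWhile (fun x => x == c)).length c := by
  rw [List.eq_replicate_iff]
  exact ⟨rfl, fun b hb => by simpa using List.mem_takeWhile_imp hb⟩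

-- step lemmas for goC and goBlk
theorem goC_cons_lt (w prev : Char) (t : List Char) (r d res : Int) (h : w < prev) :
    goC (w :: t) prev r d res = goC t w 1 1 res := by
  simp only [goC, h, decide_true, if_true]
  rfl

theorem goC_cons_ge (w prev : Char) (t : List Char) (r d res : Int) (h : ¬ w < prev) :
    goC (w :: t) prev r d res
    = goC t w (r + 1) (if prev < w then d + 1 else d)
        (if (if prev < w then d + 1 else d) = 5 then max res (r + 1) else res) := by
  simp only [goC, h, decide_false, Bool.false_eq_true, if_false]
  by_cases hgt : prev < w
  · simp only [hgt, decide_true, if_true]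
    congr 1
    by_cases h5 : d + 1 = 5
    · rw [if_pos (by simpa using h5), if_pos h5]
    · rw [if_neg (by simpa using h5), if_neg h5]
  · simp only [hgt, decide_false, Bool.false_eq_true, if_false]
    congr 1
    by_cases h5 : d = 5
    · rw [if_pos (by simpa using h5), if_pos h5]
    · rw [if_neg (by simpa using h5), if_neg h5]

theorem goBlk_cons_lt (c prev : Char) (k : Int) (bs : List (Char × Int)) (r d res : Int)
    (h : c < prev) : goBlk ((c, k) :: bs) prev r d res = goBlk bs c k 1 res := by
  simp only [goBlk, h, decide_true, if_true]
  rfl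

theorem goBlk_cons_ge (c prev : Char) (k : Int) (bs : List (Char × Int)) (r d res : Int)
    (h : ¬ c < prev) :
    goBlk ((c, k) :: bs) prev r d res
    = goBlk bs c (r + k) (if prev < c then d + 1 else d)
        (if (if prev < c then d + 1 else d) = 5 then max res (r + k) else res) := by
  simp only [goBlk, h, decide_false, Bool.false_eq_true, if_false]
  by_cases hgt : prev < c
  · simp only [hgt, decide_true, if_true]
    congr 1
    by_cases h5 : d + 1 = 5
    · rw [if_pos (by simpa using h5), if_pos h5]
    · rw [if_neg (by simpa using h5), if_neg h5]
  · simp only [hgt, decide_false, Bool.false_eq_true, if_false]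
    congr 1
    by_cases h5 : d = 5
    · rw [if_pos (by simpa using h5), if_pos h5]
    · rw [if_neg (by simpa using h5), if_neg h5]

-- goC consumes the blocks of the run-length encoding one at a time.
theorem goC_eq_goBlk_fuel :
    ∀ (n : Nat) (cs : List Char), cs.length ≤ n →
      ∀ (prev : Char) (r d res : Int), (d = 5 → r ≤ res) →
        goC cs prev r d res = goBlk (pvRle cs) prev r d res := by
  intro n
  induction n with
  | zero =>
    intro cs hcs prev r d res h
    match cs with
    | [] => rw [pvRle_nil]; rfl
  | succ n ih =>
    intro cs hcs prev r d res h
    match cs with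
    | [] => rw [pvRle_nil]; rfl
    | c :: t =>
      have hsplit : t = List.replicate (t.takeWhile (fun x => x == c)).length c
          ++ t.dropWhile (fun x => x == c) := by
        conv_lhs => rw [← List.takeWhile_append_dropWhile (p := fun x => x == c) (l := t)]
        rw [← takeWhile_eq_replicate]
      have hlen2 : (t.dropWhile (fun x => x == c)).length ≤ n := by
        have := List.length_dropWhile_le (fun x => x == c) t
        simp only [List.length_cons] at hcs; omega
      rw [pvRle_cons]
      by_cases hlt : c < prev
      · rw [goC_cons_lt c prev t r d res hlt, goBlk_cons_lt c prev _ _ r d res hlt]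
        conv_lhs => rw [hsplit]
        rw [goC_replicate c _ _ 1 1 res (by omega)]
        rw [if_neg (by omega)]
        rw [ih _ hlen2 c _ 1 res (by omega)]
        rw [show (1 : Int) + ((t.takeWhile (fun x => x == c)).length : Int)
              = ((t.takeWhile (fun x => x == c)).length : Int) + 1 by ring]
      · rw [goC_cons_ge c prev t r d res hlt, goBlk_cons_ge c prev _ _ r d res hlt]
        conv_lhs => rw [hsplit]
        rw [goC_replicate c _ _ (r + 1) _ _ (by
          intro h5; rw [if_pos h5]; exact le_max_right _ _)]
        have hcollapse :
            (if (if prev < c then d + 1 else d) = 5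
             then max (if (if prev < c then d + 1 else d) = 5 then max res (r + 1) else res)
                  (r + 1 + ((t.takeWhile (fun x => x == c)).length : Int))
             else (if (if prev < c then d + 1 else d) = 5 then max res (r + 1) else res))
            = (if (if prev < c then d + 1 else d) = 5
               then max res (r + (((t.takeWhile (fun x => x == c)).length : Int) + 1)) else res) := by
          by_cases h5 : (if prev < c then d + 1 else d) = 5
          · simp only [if_pos h5]
            rw [max_assoc]
            congr 1
            omega
          · simp only [if_neg h5]
        rw [hcollapse]
        rw [ih _ hlen2 c _ _ _ (by
          intro h5; rw [if_pos h5]; omega)]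
        rw [show r + 1 + ((t.takeWhile (fun x => x == c)).length : Int)
              = r + (((t.takeWhile (fun x => x == c)).length : Int) + 1) by ring]

theorem pvRle_chain'_fuel :
    ∀ (n : Nat) (cs : List Char), cs.length ≤ n →
      List.IsChain (fun a b : Char × Int => a.1 ≠ b.1) (pvRle cs) := by
  intro n
  induction n with
  | zero =>
    intro cs hcs
    match cs with
    | [] => rw [pvRle_nil]; exact List.isChain_nil
  | succ n ih =>
    intro cs hcs
    match cs with
    | [] => rw [pvRle_nil]; exact List.isChain_nil
    | c :: t =>
      rw [pvRle_cons]
      have hlen2 : (t.dropWhile (fun x => x == c)).length ≤ n := by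
        have := List.length_dropWhile_le (fun x => x == c) t
        simp only [List.length_cons] at hcs; omega
      match ht : t.dropWhile (fun x => x == c) with
      | [] => rw [pvRle_nil]; exact List.isChain_singleton _
      | z :: t₃ =>
        rw [pvRle_cons]
        apply List.isChain_cons_cons.mpr
        refine ⟨?_, by have := ih _ hlen2; rw [ht, pvRle_cons] at this; exact this⟩
        have hne : t.dropWhile (fun x => x == c) ≠ [] := by rw [ht]; simp
        have hz := List.head_dropWhile_not (p := fun x => x == c) (l := t) hne
        simp only [ht, List.head_cons] at hz
        intro hcz
        rw [beq_eq_false_iff_ne] at hz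
        exact hz hcz.symm

theorem pvRle_length_le_fuel :
    ∀ (n : Nat) (cs : List Char), cs.length ≤ n → (pvRle cs).length ≤ cs.length := by
  intro n
  induction n with
  | zero =>
    intro cs hcs
    match cs with
    | [] => rw [pvRle_nil]; exact le_rfl
  | succ n ih =>
    intro cs hcs
    match cs with
    | [] => rw [pvRle_nil]; exact le_rfl
    | c :: t =>
      rw [pvRle_cons]
      have hle := List.length_dropWhile_le (fun x => x == c) t
      have hlen2 : (t.dropWhile (fun x => x == c)).length ≤ n := by
        simp only [List.length_cons] at hcs; omega
      have := ih _ hlen2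
      simp only [List.length_cons]
      omega

theorem chainAsc_none_of_short :
    ∀ (m : Nat) (p : Char) (bs : List (Char × Int)), bs.length < m → chainAsc m p bs = none := by
  intro m
  induction m with
  | zero => intro p bs h; omega
  | succ m ih =>
    intro p bs h
    match bs with
    | [] => rfl
    | (c, k) :: bs' =>
      rw [chainAsc]
      by_cases hpc : p < c
      · rw [if_pos hpc, ih c bs' (by simp at h; omega)]; rfl
      · rw [if_neg hpc]

-- the heart: goBlk equals the lookahead accumulation hbest plus the pending current-run candidate.
theorem goBlk_eq_hbest :
    ∀ (bs : List (Char × Int)) (p : Char) (r d res : Int), 1 ≤ d →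
      List.IsChain (fun a b : Char × Int => a.1 ≠ b.1) ((p, 0) :: bs) →
      goBlk bs p r d res = hbest bs p (opmax res (pend p r d bs)) := by
  intro bs
  induction bs with
  | nil =>
    intro p r d res hd hch
    show res = opmax res (pend p r d [])
    rw [pend]
    by_cases h5 : d < 5
    · rw [if_pos h5, chainAsc_none_of_short _ p [] (by simp; omega)]; rfl
    · rw [if_neg h5]; rfl
  | cons b bs' ih =>
    obtain ⟨c, k⟩ := b
    intro p r d res hd hch
    have hne : c ≠ p := fun h => (List.isChain_cons_cons.mp hch).1 h.symm
    have hch' : List.IsChain (fun a b : Char × Int => a.1 ≠ b.1) ((c, 0) :: bs') := by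
      have h2 := (List.isChain_cons_cons.mp hch).2
      match bs' with
      | [] => exact List.isChain_singleton _
      | b2 :: bs'' =>
        exact List.isChain_cons_cons.mpr
          ⟨(List.isChain_cons_cons.mp h2).1, (List.isChain_cons_cons.mp h2).2⟩
    by_cases hlt : c < p
    · -- run start
      have hnp : ¬ p < c := fun h => absurd hlt (asymm h)
      simp only [goBlk, hbest, hlt, decide_true, if_true, hnp, decide_false, Bool.false_eq_true,
        if_false]
      have h15 : ((1 : Int) == 5) = false := by decide
      simp only [h15, Bool.false_eq_true, if_false]
      rw [ih c k 1 res (by omega) hch']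
      congr 1
      have hpend0 : pend p r d ((c, k) :: bs') = none := by
        rw [pend]
        by_cases h5 : d < 5
        · rw [if_pos h5]
          have : (5 - d).toNat = (5 - d).toNat - 1 + 1 := by omega
          rw [this, chainAsc, if_neg (by intro h; exact absurd hlt (not_lt.mpr (le_of_lt h)))]
          rfl
        · rw [if_neg h5]
      rw [hpend0]
      rw [pend, if_pos (by omega : (1:Int) < 5),
        show ((5:Int) - 1).toNat = 4 by decide]
      rfl
    · -- continuation: p < c
      have hgt : p < c := lt_of_le_of_ne (le_of_not_gt hlt) (Ne.symm hne)
      simp only [goBlk, hbest, hlt, decide_false, Bool.false_eq_true, if_false, hgt, decide_true,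
        if_true]

      rw [ih c (r + k) (d + 1) _ (by omega) hch']
      congr 1
      by_cases h5 : d = 4
      · -- the run completes its 5th block right here
        subst h5
        have hb : ((4 + 1 : Int) == 5) = true := by decide
        simp only [hb, if_true]
        rw [pend, if_neg (by omega), pend, if_pos (by norm_num)]
        have : ((5:Int) - 4).toNat = 1 := by norm_num
        rw [this, chainAsc, if_pos hgt]
        show max res (r + k) = opmax res (some (r + (k + 0)))
        simp [opmax]
      · by_cases hlt5 : d < 5
        · -- still short of 5 distinct blocks
          have hb : ((d + 1 : Int) == 5) = false := by simpa using fun h => h5 (by omega)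
          simp only [hb, Bool.false_eq_true, if_false]
          rw [pend, if_pos (by omega), pend, if_pos hlt5]
          have hm : (5 - d).toNat = (4 - d).toNat + 1 := by omega
          have hm2 : (5 - (d + 1)).toNat = (4 - d).toNat := by omega
          rw [hm, hm2, chainAsc, if_pos hgt]
          cases h : chainAsc (4 - d).toNat c bs' with
          | none => rfl
          | some v => simp [opmax]; ring_nf
        · -- already past 5 distinct blocks
          have hb : ((d + 1 : Int) == 5) = false := by simpa using fun h => h5 (by omega)
          simp only [hb, Bool.false_eq_true, if_false]
          rw [pend, if_neg (by omega), pend, if_neg (by omega)]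

theorem hbest_short :
    ∀ (bs : List (Char × Int)) (p : Char) (best : Int), bs.length ≤ 4 → hbest bs p best = best := by
  intro bs
  induction bs with
  | nil => intro p best h; rfl
  | cons b bs' ih =>
    obtain ⟨c, k⟩ := b
    intro p best h
    rw [hbest, chainAsc_none_of_short 4 c bs' (by simp at h; omega)]
    simp only [Option.map_none]
    have hid : (if decide (p < c) then best else opmax best none) = best := by
      split <;> rfl
    rw [hid, ih c best (by simp at h; omega)]

-- B's loop body at s = 0 on a list of at least five blocks.
theorem eval0 (b c1 c2 c3 c4 : Char × Int) (rest : List (Char × Int)) (best : Int) :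
    pvCand (b :: c1 :: c2 :: c3 :: c4 :: rest) best 0
    = opmax best ((chainAsc 4 b.1 (c1 :: c2 :: c3 :: c4 :: rest)).map (b.2 + ·)) := by
  obtain ⟨b0, k0⟩ := b; obtain ⟨x1, k1⟩ := c1; obtain ⟨x2, k2⟩ := c2
  obtain ⟨x3, k3⟩ := c3; obtain ⟨x4, k4⟩ := c4
  rw [pvCand, if_neg (by simp)]
  have hsl : PySem.List.slice
      ((b0,k0) :: (x1,k1) :: (x2,k2) :: (x3,k3) :: (x4,k4) :: rest)
      (some (0:Int)) (some ((0:Int)+5)) = [(b0,k0),(x1,k1),(x2,k2),(x3,k3),(x4,k4)] := by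
    rw [show ((0:Int)) = ((0:Nat):Int) from rfl, show (((0:Nat):Int)+5) = ((5:Nat):Int) from rfl,
        PySem.List.slice_natCast]
    simp
  rw [hsl]
  simp [pysem]
  simp only [chainAsc]
  by_cases h1 : b0 < x1 <;> by_cases h2 : x1 < x2 <;> by_cases h3 : x2 < x3 <;>
    by_cases h4 : x3 < x4 <;>
    simp [h1, h2, h3, h4, opmax] <;> ring_nf

-- B's loop body at s = 1 on pre :: (a list of at least five blocks).
theorem eval1 (pre b c1 c2 c3 c4 : Char × Int) (rest : List (Char × Int)) (best : Int) :
    pvCand (pre :: b :: c1 :: c2 :: c3 :: c4 :: rest) best 1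
    = (if decide (pre.1 < b.1) then best
       else opmax best ((chainAsc 4 b.1 (c1 :: c2 :: c3 :: c4 :: rest)).map (b.2 + ·))) := by
  obtain ⟨p0, q0⟩ := pre; obtain ⟨b0, k0⟩ := b; obtain ⟨x1, k1⟩ := c1; obtain ⟨x2, k2⟩ := c2
  obtain ⟨x3, k3⟩ := c3; obtain ⟨x4, k4⟩ := c4
  rw [pvCand]
  have hsl : PySem.List.slice
      ((p0,q0) :: (b0,k0) :: (x1,k1) :: (x2,k2) :: (x3,k3) :: (x4,k4) :: rest)
      (some (1:Int)) (some ((1:Int)+5)) = [(b0,k0),(x1,k1),(x2,k2),(x3,k3),(x4,k4)] := by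
    rw [show ((1:Int)) = ((1:Nat):Int) from rfl, show (((1:Nat):Int)+5) = ((6:Nat):Int) from rfl,
        PySem.List.slice_natCast]
    simp
  rw [hsl]
  by_cases h0 : p0 < b0
  · simp [pysem, h0]
  · simp [pysem, h0]
    simp only [chainAsc]
    by_cases h1 : b0 < x1 <;> by_cases h2 : x1 < x2 <;> by_cases h3 : x2 < x3 <;>
      by_cases h4 : x3 < x4 <;>
      simp [h1, h2, h3, h4, opmax] <;> ring_nf

theorem four_split {α : Type} (l : List α) (h : 4 ≤ l.length) :
    ∃ a b c d t, l = a :: b :: c :: d :: t := by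
  match l with
  | a :: b :: c :: d :: t => exact ⟨a, b, c, d, t, rfl⟩
  | [] => simp at h
  | [a] => simp at h
  | [a, b] => simp at h
  | [a, b, c] => simp at h

-- shifting B's loop body across a cons (positions s ≥ 1 only).
theorem pvCand_cons_shift (x : Char × Int) (blocks : List (Char × Int)) (acc : Int) (k : Nat) :
    pvCand (x :: blocks) acc ((k : Int) + 2) = pvCand blocks acc ((k : Int) + 1) := by
  rw [pvCand, pvCand]
  rw [show ((k:Int) + 2 - 1) = ((k + 1 : Nat) : Int) by push_cast; ring,
      show ((k:Int) + 2) = ((k + 2 : Nat) : Int) by push_cast; ring,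
      show (((k + 2 : Nat) : Int) + 1) = ((k + 3 : Nat) : Int) by push_cast; ring,
      show (((k + 2 : Nat) : Int) + 2) = ((k + 4 : Nat) : Int) by push_cast; ring,
      show (((k + 2 : Nat) : Int) + 3) = ((k + 5 : Nat) : Int) by push_cast; ring,
      show (((k + 2 : Nat) : Int) + 4) = ((k + 6 : Nat) : Int) by push_cast; ring,
      show (((k + 2 : Nat) : Int) + 5) = ((k + 7 : Nat) : Int) by push_cast; ring]
  rw [show ((k:Int) + 1 - 1) = ((k : Nat) : Int) by push_cast; ring,
      show ((k:Int) + 1) = ((k + 1 : Nat) : Int) by push_cast; ring,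
      show (((k + 1 : Nat) : Int) + 1) = ((k + 2 : Nat) : Int) by push_cast; ring,
      show (((k + 1 : Nat) : Int) + 2) = ((k + 3 : Nat) : Int) by push_cast; ring,
      show (((k + 1 : Nat) : Int) + 3) = ((k + 4 : Nat) : Int) by push_cast; ring,
      show (((k + 1 : Nat) : Int) + 4) = ((k + 5 : Nat) : Int) by push_cast; ring,
      show (((k + 1 : Nat) : Int) + 5) = ((k + 6 : Nat) : Int) by push_cast; ring]
  have hsl : PySem.List.slice (x :: blocks) (some ((k + 2 : Nat) : Int)) (some ((k + 7 : Nat) : Int))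
      = PySem.List.slice blocks (some ((k + 1 : Nat) : Int)) (some ((k + 6 : Nat) : Int)) := by
    rw [PySem.List.slice_natCast, PySem.List.slice_natCast]
    have : (x :: blocks).drop (k + 2) = blocks.drop (k + 1) := by simp [List.drop_succ_cons]
    rw [this]
    congr 1
    omega
  rw [hsl]
  have hgt1 : decide (((k + 2 : Nat) : Int) > 0) = true := by simp <;> omega
  have hgt2 : decide (((k + 1 : Nat) : Int) > 0) = true := by simp <;> omega
  simp only [hgt1, hgt2, Bool.true_and, PySem.List.pyGetD_natCast]
  simp only [show ∀ m : Nat, k + (m + 1) = (k + m) + 1 from fun m => by omega]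
  simp only [List.getD_cons_succ]

-- SHIFT: the tail of B's index loop (s = k + 1 over pre :: bs) is the recursion hbest.
theorem shift_lemma :
    ∀ (bs : List (Char × Int)) (pre : Char × Int) (best : Int),
      (List.range (bs.length - 4)).foldl
        (fun (acc : Int) (k : Nat) => pvCand (pre :: bs) acc ((k : Int) + 1)) best
      = hbest bs pre.1 best := by
  intro bs
  induction bs with
  | nil => intro pre best; rfl
  | cons b bs' ih =>
    intro pre best
    by_cases hlen : bs'.length ≤ 3
    · have h0 : (b :: bs').length - 4 = 0 := by simp; omega
      rw [h0]
      rw [hbest_short (b :: bs') pre.1 best (by simp; omega)]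
      rfl
    · obtain ⟨c1, c2, c3, c4, rest4, rfl⟩ := four_split bs' (by omega)
      have h1 : (b :: c1 :: c2 :: c3 :: c4 :: rest4).length - 4
          = ((c1 :: c2 :: c3 :: c4 :: rest4).length - 4) + 1 := by simp
      rw [h1, List.range_succ_eq_map, List.foldl_cons, List.foldl_map]
      simp only [Nat.succ_eq_add_one, Nat.cast_add, Nat.cast_one, Nat.cast_zero, zero_add,
        add_assoc, one_add_one_eq_two]
      simp only [pvCand_cons_shift]
      rw [ih b _]
      rw [eval1 pre b c1 c2 c3 c4 rest4 best]
      rfl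

theorem port_eq_hbest0 (blocks : List (Char × Int)) :
    (PySem.List.pyRange 0 ((blocks.length : Int) - 4) 1).foldl (pvCand blocks) 0
    = hbest0 blocks := by
  have hr : PySem.List.pyRange 0 ((blocks.length : Int) - 4) 1
      = (List.range (blocks.length - 4)).map (fun (k : Nat) => (k : Int)) := by
    rw [PySem.List.pyRange_one]
    have h4 : (((blocks.length : Int) - 4) - 0).toNat = blocks.length - 4 := by omega
    rw [h4]
    simp
  rw [hr, List.foldl_map]
  match blocks with
  | [] => rfl
  | b :: bs =>
    by_cases hlen : bs.length ≤ 3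
    · have h0 : (b :: bs).length - 4 = 0 := by simp; omega
      rw [h0]
      show (0 : Int) = hbest0 (b :: bs)
      obtain ⟨c, k⟩ := b
      show (0 : Int) = hbest bs c (opmax 0 ((chainAsc 4 c bs).map (k + ·)))
      rw [chainAsc_none_of_short 4 c bs (by omega)]
      rw [hbest_short bs c _ (by omega)]
      rfl
    · obtain ⟨c1, c2, c3, c4, rest4, rfl⟩ := four_split bs (by omega)
      have h1 : (b :: c1 :: c2 :: c3 :: c4 :: rest4).length - 4
          = ((c1 :: c2 :: c3 :: c4 :: rest4).length - 4) + 1 := by simp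
      rw [h1, List.range_succ_eq_map, List.foldl_cons, List.foldl_map]
      simp only [Nat.succ_eq_add_one, Nat.cast_add, Nat.cast_one, Nat.cast_zero]
      rw [shift_lemma (c1 :: c2 :: c3 :: c4 :: rest4) b _]
      rw [eval0 b c1 c2 c3 c4 rest4 0]
      obtain ⟨c, k⟩ := b
      rfl

-- ===== VERDICT (by name: the statement is the Claim_ definition above) =====
theorem longestBeautifulSubstring_spec : Claim_equal_longestBeautifulSubstring := by
  intro word _
  unfold Spec_longestBeautifulSubstring longestBeautifulSubstring longestBeautifulSubstring_alt
  rw [port_eq_hbest0 (pvRle word.toList)]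
  cases hcs : word.toList with
  | nil =>
    rw [pvRle_nil]
    simp
    rfl
  | cons c rest =>
    by_cases hlen : (c :: rest).length < 5
    · rw [if_pos hlen]
      have hble : (pvRle (c :: rest)).length ≤ (c :: rest).length :=
        pvRle_length_le_fuel (c :: rest).length (c :: rest) le_rfl
      match hb : pvRle (c :: rest), hble with
      | [], _ => rfl
      | b :: bs, hble =>
        obtain ⟨c0, k0⟩ := b
        show (0 : Int) = hbest bs c0 (opmax 0 ((chainAsc 4 c0 bs).map (k0 + ·)))
        rw [chainAsc_none_of_short 4 c0 bs (by
          simp only [List.length_cons] at hble hlen; omega)]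
        rw [hbest_short bs c0 _ (by simp only [List.length_cons] at hble hlen; omega)]
        rfl
    · rw [if_neg hlen]
      -- A side down to goC
      rw [PySem.List.enumerate_cons, List.foldl_cons]
      have hfirst : stepA (c :: rest) (PySem.Set.empty, 0, 0) ((0 : Int), c)
          = (([c] : PySem.Set Char), 0, 0) := rfl
      rw [hfirst]
      have hA := extA (c :: rest) rest 1 c [c] 0 0 (by omega) (by rfl) (by rfl)
      simp only [Nat.cast_one] at hA
      rw [show ((0 : Int) + 1) = (1 : Int) from by ring, hA]
      rw [goA_eq_goC rest c [c] 1 0 0 1 1 (by simp) (by simp) rfl (by ring)]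
      -- split off the first block of the word
      have hsplit : rest = List.replicate (rest.takeWhile (fun x => x == c)).length c
          ++ rest.dropWhile (fun x => x == c) := by
        conv_lhs => rw [← List.takeWhile_append_dropWhile (p := fun x => x == c) (l := rest)]
        rw [← takeWhile_eq_replicate]
      conv_lhs => rw [hsplit]
      rw [goC_replicate c _ _ 1 1 0 (by omega), if_neg (by omega)]
      rw [goC_eq_goBlk_fuel (rest.dropWhile (fun x => x == c)).length _ le_rfl c _ 1 0 (by omega)]
      -- B side: hbest0 of the rle, bridged by goBlk_eq_hbest
      rw [pvRle_cons]
      show goBlk (pvRle (rest.dropWhile (fun x => x == c))) c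
          (1 + ((rest.takeWhile (fun x => x == c)).length : Int)) 1 0
        = hbest (pvRle (rest.dropWhile (fun x => x == c))) c
            (opmax 0 ((chainAsc 4 c (pvRle (rest.dropWhile (fun x => x == c)))).map
              ((((rest.takeWhile (fun x => x == c)).length : Int) + 1) + ·)))
      have hchain := pvRle_chain'_fuel (c :: rest).length (c :: rest) le_rfl
      rw [pvRle_cons] at hchain
      have hchain' : List.IsChain (fun a b : Char × Int => a.1 ≠ b.1)
          ((c, 0) :: pvRle (rest.dropWhile (fun x => x == c))) := by
        match hb : pvRle (rest.dropWhile (fun x => x == c)), hchain with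
        | [], _ => exact List.isChain_singleton _
        | b2 :: bs'', hchain =>
          exact List.isChain_cons_cons.mpr
            ⟨(List.isChain_cons_cons.mp hchain).1, (List.isChain_cons_cons.mp hchain).2⟩
      rw [goBlk_eq_hbest (pvRle (rest.dropWhile (fun x => x == c))) c
            (1 + ((rest.takeWhile (fun x => x == c)).length : Int)) 1 0 (by omega) hchain']
      congr 1
      rw [pend, if_pos (by omega : (1:Int) < 5), show ((5:Int) - 1).toNat = 4 by decide]
      rw [show (1 + ((rest.takeWhile (fun x => x == c)).length : Int))
            = (((rest.takeWhile (fun x => x == c)).length : Int) + 1) by ring]
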